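-- pv_equiv track=rewrite | github.com/SpoolSense/spoolsense_middleware | scripts/spoolman-cleanup.py | find_duplicate_vendors
-- ===== SOURCE A (Python) =====
-- def find_duplicate_vendors(vendors):
--     groups = {}
--     for vendor in vendors:
--         name = vendor.get('name', '').lower()
--         if not name:
--             continue
--         if name not in groups:
--             groups[name] = []
--         groups[name].append(vendor)
--     return {k: v for k, v in groups.items() if len(v) > 1}
-- ===== SOURCE B (Python) =====
-- def find_duplicate_vendors(vendors):
--     keys = [v.get('name', '').lower() for v in vendors]
--     result = {}
--     for n in dict.fromkeys(keys):
--         if not n: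
--             continue
--         group = [v for v, k in zip(vendors, keys) if k == n]
--         if len(group) > 1:
--             result[n] = group
--     return result
-- ===== Notes on version B (the rewrite author's own statement) =====
-- stated objective: alternative
-- what changed: Replaces the single-pass dict-of-lists accumulation with an inverted strategy: first collect the distinct non-empty lowercased names in first-occurrence order, then for each such name scan the vendor list once to materialize its group, keeping groups of size > 1.
import Mathlib
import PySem

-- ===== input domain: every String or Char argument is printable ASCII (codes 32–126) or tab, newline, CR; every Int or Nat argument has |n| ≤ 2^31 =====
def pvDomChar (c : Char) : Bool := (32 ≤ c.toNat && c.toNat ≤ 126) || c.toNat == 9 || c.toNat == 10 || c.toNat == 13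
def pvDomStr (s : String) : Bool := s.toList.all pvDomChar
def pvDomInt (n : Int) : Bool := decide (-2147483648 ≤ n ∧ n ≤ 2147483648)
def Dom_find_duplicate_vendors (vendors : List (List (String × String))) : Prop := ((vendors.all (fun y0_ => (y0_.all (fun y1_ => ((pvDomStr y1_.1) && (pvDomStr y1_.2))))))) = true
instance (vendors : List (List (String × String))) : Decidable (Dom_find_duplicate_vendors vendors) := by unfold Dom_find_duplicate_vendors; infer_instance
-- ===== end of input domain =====

-- B replaces A's single-pass dict-of-lists accumulation by an inverted strategy (distinct
-- names first, then one scan of the vendors per name); alternative structure, same result.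


-- ===== PORT A =====
-- literal port of A: one fold building the dict of groups, then the dict comprehension
-- keeping groups of length > 1 (groups' keys are distinct, so the comprehension is a filter
-- of the items list).
def find_duplicate_vendors (vendors : List (List (String × String))) : List (String × List (List (String × String))) :=
  let groups := vendors.foldl
    (fun g vendor =>
      let name := PySem.Str.lower (PySem.Dict.getD (PySem.Dict.mk vendor) "name" "")
      if name = "" then g
      else
        let g' := if g.contains name then g else g.insert name []
        g'.modify name [] (fun l => l ++ [vendor]))
    PySem.Dict.empty
  groups.items.filter (fun kv => decide (1 < kv.2.length))

-- ===== PORT B =====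
-- literal port of B (Source B): precompute the lowercased keys, iterate over their ordered
-- dedup (dict.fromkeys), and per name collect its group by scanning zip(vendors, keys);
-- result[n] = group always inserts a fresh key (dedup keys are distinct), i.e. appends.
def find_duplicate_vendors_alt (vendors : List (List (String × String))) : List (String × List (List (String × String))) :=
  let keys := vendors.map (fun v => PySem.Str.lower (PySem.Dict.getD (PySem.Dict.mk v) "name" ""))
  (PySem.List.dedup keys).foldl
    (fun result n =>
      if n = "" then result
      else
        let group := ((vendors.zip keys).filter (fun p => p.2 == n)).map (fun p => p.1)
        if 1 < group.length then result ++ [(n, group)] else result)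
    []

-- ===== PRECONDITION & SPEC =====
def Spec_find_duplicate_vendors (vendors : List (List (String × String))) (out : List (String × List (List (String × String)))) : Prop := out = find_duplicate_vendors_alt vendors
instance (vendors : List (List (String × String))) (out : List (String × List (List (String × String)))) : Decidable (Spec_find_duplicate_vendors vendors out) := by unfold Spec_find_duplicate_vendors; infer_instance

-- ===== CLAIM (what is proved, stated in full; the proofs are below) =====
def Claim_equal_find_duplicate_vendors : Prop := ∀ (vendors : List (List (String × String))), Dom_find_duplicate_vendors vendors → Spec_find_duplicate_vendors vendors (find_duplicate_vendors vendors)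

-- ===== LEMMAS AND PROOFS =====

-- the lowercased name of a vendor
def pvName (v : List (String × String)) : String := PySem.Str.lower (PySem.Dict.getD (PySem.Dict.mk v) "name" "")

-- A's loop step: the conditional `groups[name] = []` followed by append is one `modify`
theorem pvStepA_eq (g : PySem.Dict String (List (List (String × String)))) (k : String)
    (v : List (String × String)) :
    ((if g.contains k then g else g.insert k []).modify k [] (fun l => l ++ [v]))
      = g.modify k [] (fun l => l ++ [v]) := by
  by_cases h : g.contains k
  · simp [h]
  · have h0 : g.contains k = false := by simpa using h
    simp [h0, PySem.Dict.modify, PySem.Dict.insert_insert_self,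
      PySem.Dict.getD_insert_self, PySem.Dict.getD_of_not_contains g [] h0]

-- A's loop = the canonical grouping loop over the (name, vendor) pairs with non-empty name
theorem pvFoldA_eq (vs : List (List (String × String)))
    (d : PySem.Dict String (List (List (String × String)))) :
    vs.foldl (fun g v => if pvName v = "" then g else g.modify (pvName v) [] (fun l => l ++ [v])) d
      = ((vs.filter (fun v => !(pvName v == ""))).map (fun v => (pvName v, v))).foldl
          (fun g p => g.modify p.1 [] (fun l => l ++ [p.2])) d := by
  induction vs generalizing d with
  | nil => rfl
  | cons v vs ih =>
    by_cases h : pvName v = ""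
    · simp [List.foldl_cons, h, ih]
    · simp [List.foldl_cons, h, ih]

-- collecting the pairs with first component k gives exactly the vendors named k (k ≠ "")
theorem pvPairs_collect (vs : List (List (String × String))) (k : String) (hk : k ≠ "") :
    (((vs.filter (fun v => !(pvName v == ""))).map (fun v => (pvName v, v))).filter
        (fun p => p.1 == k)).map (fun p => p.2)
      = vs.filter (fun v => pvName v == k) := by
  induction vs with
  | nil => rfl
  | cons v vs ih =>
    by_cases h : pvName v = ""
    · simp [h, Ne.symm hk, ih]
    · by_cases h2 : pvName v = k
      · simp [h2, hk, ih]
      · simp [h, h2, ih]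

-- zip-with-its-own-map collection = direct filter
theorem pvZip_collect (vs : List (List (String × String))) (n : String) :
    ((vs.zip (vs.map pvName)).filter (fun p => p.2 == n)).map (fun p => p.1)
      = vs.filter (fun v => pvName v == n) := by
  induction vs with
  | nil => rfl
  | cons v vs ih =>
    by_cases h : pvName v = n
    · simp [List.zip_cons_cons, h, ih]
    · simp [List.zip_cons_cons, h, ih]

-- ordered dedup commutes with filter
theorem pvSet_ofList_filter (p : String → Bool) (l : List String) :
    PySem.Set.ofList (l.filter p) = (PySem.Set.ofList l).filter p := by
  have main : ∀ (l : List String) (s : List String),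
      (l.filter p).foldl PySem.Set.add (s.filter p) = (l.foldl PySem.Set.add s).filter p := by
    intro l
    induction l with
    | nil => intro s; rfl
    | cons x xs ih =>
      intro s
      by_cases hp : p x
      · have hthis : (PySem.Set.add s x).filter p = PySem.Set.add (s.filter p) x := by
          by_cases hm : x ∈ s
          · simp [PySem.Set.add, PySem.Set.contains, hm, List.mem_filter, hp]
          · simp [PySem.Set.add, PySem.Set.contains, hm, List.mem_filter, hp,
              List.filter_append]
        rw [List.filter_cons, if_pos hp, List.foldl_cons, List.foldl_cons,
          ← ih (PySem.Set.add s x), hthis]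
      · have hthis : (PySem.Set.add s x).filter p = s.filter p := by
          by_cases hm : x ∈ s
          · simp [PySem.Set.add, PySem.Set.contains, hm]
          · simp [PySem.Set.add, PySem.Set.contains, hm, List.filter_append, hp]
        have hfx : (x :: xs).filter p = xs.filter p := by simp [hp]
        rw [hfx, List.foldl_cons, ← ih (PySem.Set.add s x), hthis]
  simpa [PySem.Set.ofList_eq_foldl] using main l []

-- a skip/append loop is a filterMap
theorem pvFoldB_filterMap (coll : String → List (List (String × String)))
    (S : List String) (r0 : List (String × List (List (String × String)))) :
    S.foldl (fun r n => if n = "" then r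
        else if 1 < (coll n).length then r ++ [(n, coll n)] else r) r0
      = r0 ++ S.filterMap (fun n => if n = "" then none
          else if 1 < (coll n).length then some (n, coll n) else none) := by
  induction S generalizing r0 with
  | nil => simp
  | cons n S ih =>
    by_cases h : n = ""
    · simp [h, ih]
    · by_cases h2 : 1 < (coll n).length
      · simp [h, h2, ih]
      · simp [h, h2, ih]

-- the filtered map of the non-empty names = the filterMap with the "" skip
theorem pvMap_filter_filterMap (coll : String → List (List (String × String)))
    (S : List String) :
    ((S.filter (fun n => !(n == ""))).map (fun k => (k, coll k))).filter
        (fun kv => decide (1 < kv.2.length))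
      = S.filterMap (fun n => if n = "" then none
          else if 1 < (coll n).length then some (n, coll n) else none) := by
  induction S with
  | nil => rfl
  | cons n S ih =>
    by_cases h : n = ""
    · simp [h, ih]
    · by_cases h2 : 1 < (coll n).length
      · simp [h, h2, ih]
      · simp [h, h2, ih]

-- ===== VERDICT (by name: the statement is the Claim_ definition above) =====
theorem find_duplicate_vendors_spec : Claim_equal_find_duplicate_vendors := by
  intro vendors _
  unfold Spec_find_duplicate_vendors
  simp only [find_duplicate_vendors, find_duplicate_vendors_alt]
  -- collapse A's step
  have hstep : (fun (g : PySem.Dict String (List (List (String × String)))) vendor =>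
      if PySem.Str.lower (PySem.Dict.getD (PySem.Dict.mk vendor) "name" "") = "" then g
      else
        (if g.contains (PySem.Str.lower (PySem.Dict.getD (PySem.Dict.mk vendor) "name" "")) then g
         else g.insert (PySem.Str.lower (PySem.Dict.getD (PySem.Dict.mk vendor) "name" "")) []).modify
          (PySem.Str.lower (PySem.Dict.getD (PySem.Dict.mk vendor) "name" "")) [] (fun l => l ++ [vendor]))
      = (fun g v => if pvName v = "" then g else g.modify (pvName v) [] (fun l => l ++ [v])) := by
    funext g v
    change (if pvName v = "" then g
        else (if g.contains (pvName v) then g else g.insert (pvName v) []).modify (pvName v) []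
          (fun l => l ++ [v])) = _
    by_cases h : pvName v = ""
    · simp [h]
    · simp only [if_neg h]
      exact pvStepA_eq g (pvName v) v
  rw [hstep, pvFoldA_eq]
  set pairs := ((vendors.filter (fun v => !(pvName v == ""))).map (fun v => (pvName v, v))) with hpairs
  set groups := pairs.foldl (fun g p => g.modify p.1 [] (fun l => l ++ [p.2])) PySem.Dict.empty with hgroups
  have hnodup : groups.keys.Nodup := by
    rw [hgroups]
    exact PySem.Dict.nodup_keys_foldl_modify_key pairs Prod.fst [] (fun _ p => fun l => l ++ [p.2]) _
      (by simp)
  have hkeys : groups.keys = PySem.Set.ofList ((vendors.map pvName).filter (fun n => !(n == ""))) := by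
    rw [hgroups]
    rw [PySem.Dict.keys_foldl_modify_key pairs Prod.fst [] (fun _ p => fun l => l ++ [p.2])]
    have hfst : pairs.map Prod.fst = (vendors.map pvName).filter (fun n => !(n == "")) := by
      rw [hpairs, List.map_map, List.filter_map]
      rfl
    rw [hfst]
    simp [PySem.Set.update_nil_left, PySem.Dict.keys_empty]
  have hgetD : ∀ k, k ≠ "" → groups.getD k [] = vendors.filter (fun v => pvName v == k) := by
    intro k hk
    rw [hgroups, PySem.Dict.getD_foldl_modify_append, hpairs]
    simpa [PySem.Dict.getD_empty] using pvPairs_collect vendors k hk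
  -- items as a map over keys
  rw [PySem.Dict.items_eq_map_keys groups hnodup [], hkeys]
  -- rewrite each entry with the direct collection
  have hmap : (PySem.Set.ofList ((vendors.map pvName).filter (fun n => !(n == "")))).map
        (fun k => (k, groups.getD k []))
      = (PySem.Set.ofList ((vendors.map pvName).filter (fun n => !(n == "")))).map
        (fun k => (k, vendors.filter (fun v => pvName v == k))) := by
    apply List.map_congr_left
    intro k hkmem
    have hk : k ≠ "" := by
      have := (PySem.Set.mem_ofList _ _).mp hkmem
      simp [List.mem_filter] at this
      exact this.2
    rw [hgetD k hk]
  rw [hmap]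
  -- B side
  rw [pvSet_ofList_filter (fun n => !(n == "")) (vendors.map pvName),
    pvMap_filter_filterMap (fun k => vendors.filter (fun v => pvName v == k))]
  have hv : (fun v : List (String × String) =>
      PySem.Str.lower (PySem.Dict.getD (PySem.Dict.mk v) "name" "")) = pvName := rfl
  simp only [hv]
  have hfold := pvFoldB_filterMap
    (fun n => ((vendors.zip (vendors.map pvName)).filter (fun p => p.2 == n)).map (fun p => p.1))
    (PySem.Set.ofList (vendors.map pvName))
    []
  have hcoll : ∀ n, ((vendors.zip (vendors.map pvName)).filter (fun p => p.2 == n)).map (fun p => p.1)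
      = vendors.filter (fun v => pvName v == n) := fun n => pvZip_collect vendors n
  rw [PySem.List.dedup_eq_ofList, hfold]
  simp only [hcoll, List.nil_append]
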